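-- pv_equiv track=rewrite | github.com/MrBrantCode/unitest_baseline | mut_generate/mist_train_cf/cf_4139/solution.py | longest_string
-- ===== SOURCE A (Python) =====
-- def longest_string(strings, k):
--     longest = None
--     for string in strings:
--         if len(string) <= k:
--             if longest is None or len(string) > len(longest):
--                 longest = string
--             elif len(string) == len(longest):
--                 if string < longest:
--                     longest = string
--     return longest
-- ===== SOURCE B (Python) =====
-- def longest_string(strings, k):
--     cands = [s for s in strings if len(s) <= k]
--     cands.sort(key=lambda s: (-len(s), s))
--     return cands[0] if cands else None
-- ===== Notes on version B (the rewrite author's own statement) =====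
-- stated objective: idiomatic
-- what changed: Replaces A's incremental best-so-far scan with build-filter-sort-index: collect candidates with a comprehension, sort by (-len, s), return the first element (None if empty).
import Mathlib
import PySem

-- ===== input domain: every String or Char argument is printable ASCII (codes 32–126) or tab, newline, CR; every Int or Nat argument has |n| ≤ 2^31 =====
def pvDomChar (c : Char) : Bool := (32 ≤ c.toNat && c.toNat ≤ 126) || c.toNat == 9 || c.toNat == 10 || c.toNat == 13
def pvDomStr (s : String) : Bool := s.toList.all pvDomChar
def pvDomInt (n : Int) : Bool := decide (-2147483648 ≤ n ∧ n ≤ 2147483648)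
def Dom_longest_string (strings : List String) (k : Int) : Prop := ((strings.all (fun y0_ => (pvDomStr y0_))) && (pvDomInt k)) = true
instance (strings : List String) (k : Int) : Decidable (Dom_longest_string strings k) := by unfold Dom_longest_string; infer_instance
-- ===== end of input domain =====

-- B replaces A's incremental best-so-far scan with filter-then-sort by (-len, s) then first element (more idiomatic, not faster).


-- ===== PORT A =====
-- Python's 'string < longest' is lexicographic over code points: ported as '<' on toList (List Char, code-point order), which is exact.
def longest_string (strings : List String) (k : Int) : Option String :=
  strings.foldl (fun longest string =>
    if PySem.Str.len string ≤ k then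
      match longest with
      | none => some string
      | some l =>
        if PySem.Str.len string > PySem.Str.len l then some string
        else if PySem.Str.len string = PySem.Str.len l then
          if string.toList < l.toList then some string else some l
        else some l
    else longest) none

-- ===== PORT B =====
-- Source B: cands = [s for s in strings if len(s) <= k]; cands.sort(key=lambda s: (-len(s), s)); return cands[0] if cands else None
-- The tuple key (-len(s), s) is PySem.List.sorted2 with k1 = -len, k2 = the string's chars (exact on code points).
def longest_string_alt (strings : List String) (k : Int) : Option String :=
  let cands := strings.filter (fun s => decide (PySem.Str.len s ≤ k))
  (PySem.List.sorted2 cands (fun s => -(PySem.Str.len s)) (fun s => s.toList)).head?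

-- ===== PRECONDITION & SPEC =====
def Spec_longest_string (strings : List String) (k : Int) (out : Option String) : Prop := out = longest_string_alt strings k
instance (strings : List String) (k : Int) (out : Option String) : Decidable (Spec_longest_string strings k out) := by unfold Spec_longest_string; infer_instance

-- ===== CLAIM (what is proved, stated in full; the proofs are below) =====
def Claim_equal_longest_string : Prop := ∀ (strings : List String) (k : Int), Dom_longest_string strings k → Spec_longest_string strings k (longest_string strings k)

-- ===== LEMMAS AND PROOFS =====

-- the comparison sorted2 uses for key (-len, chars)
def pvBefore (a b : String) : Bool :=
  decide (-(PySem.Str.len a) < -(PySem.Str.len b)) ||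
    (!decide (-(PySem.Str.len b) < -(PySem.Str.len a)) && decide (a.toList < b.toList))

-- the fold step both sides reduce to on candidate strings
def pvStep (o : Option String) (s : String) : Option String :=
  some (match o with | none => s | some l => if pvBefore s l then s else l)

theorem head?_insertBy {α : Type} (before : α → α → Bool) (x : α) (ys : List α) :
    (PySem.List.insertBy before x ys).head? =
      some (match ys with | [] => x | y :: _ => if before x y then x else y) := by
  cases ys with
  | nil => rfl
  | cons y t => simp only [PySem.List.insertBy]; split <;> simp

theorem head?_foldl_insertBy {α : Type} (before : α → α → Bool) :
    ∀ (cands : List α) (ys : List α),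
      (cands.foldl (fun acc x => PySem.List.insertBy before x acc) ys).head? =
        cands.foldl (fun o s => some (match o with | none => s | some l => if before s l then s else l)) ys.head? := by
  intro cands
  induction cands with
  | nil => intro ys; rfl
  | cons x cs ih =>
    intro ys
    simp only [List.foldl_cons]
    rw [ih, head?_insertBy]
    cases ys <;> rfl

-- A's per-string update, named so the filter/fold lemma can be applied (definitionally equal to the lambda in the port)
def pvF (longest : Option String) (string : String) : Option String :=
  match longest with
  | none => some string
  | some l =>
    if PySem.Str.len string > PySem.Str.len l then some string
    else if PySem.Str.len string = PySem.Str.len l then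
      if string.toList < l.toList then some string else some l
    else some l

theorem step_eq (l s : String) : pvF (some l) s = pvStep (some l) s := by
  simp only [pvF, pvStep, pvBefore, PySem.Str.len_eq, String.length_toList, gt_iff_lt]
  rcases lt_trichotomy s.length l.length with h | h | h
  · rw [if_neg (by omega), if_neg (by omega)]
    have p1 : ¬(-(s.length : Int) < -(l.length : Int)) := by omega
    have p2 : (-(l.length : Int) < -(s.length : Int)) := by omega
    simp [p1, p2]
  · rw [if_neg (by omega), if_pos (show ((s.length : Int) = (l.length : Int)) by omega)]
    have p1 : ¬(-(s.length : Int) < -(l.length : Int)) := by omega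
    have p2 : ¬(-(l.length : Int) < -(s.length : Int)) := by omega
    by_cases hc : s.toList < l.toList
    · simp [p1, p2, hc]
    · simp [p1, p2, hc]
  · rw [if_pos (by omega)]
    have p1 : (-(s.length : Int) < -(l.length : Int)) := by omega
    simp [p1]

theorem longest_string_spec_aux (strings : List String) (k : Int) :
    longest_string strings k = longest_string_alt strings k := by
  have hfilter := PySem.List.foldl_ite_eq_foldl_filter
      (p := fun s => PySem.Str.len s ≤ k) (f := pvF) (l := strings) (init := (none : Option String))
  have h2 : ((strings.filter (fun s => decide (PySem.Str.len s ≤ k))).foldl pvF none)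
      = longest_string_alt strings k := by
    unfold longest_string_alt
    simp only [PySem.List.sorted2]
    rw [head?_foldl_insertBy]
    refine PySem.List.foldl_congr_mem _ _ _ _ ?_
    intro o s _
    cases o with
    | none => rfl
    | some l => exact step_eq l s
  exact hfilter.trans h2

-- ===== VERDICT (by name: the statement is the Claim_ definition above) =====
theorem longest_string_spec : Claim_equal_longest_string := by
  intro strings k _
  exact longest_string_spec_aux strings k
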